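-- pv_equiv track=rewrite | github.com/core-stack-org/core-stack-backend | utilities/scripts/facilities_data_cleaning.py | _normalize_single_letters
-- ===== SOURCE A (Python) =====
-- def _normalize_single_letters(words: list, abbreviation_set: set) -> list:
--     """
--     Handle consecutive single letters: B R AMBEDKAR → B. R. Ambedkar
--     """
--     result = []
--     i = 0
--
--     while i < len(words):
--         word = words[i]
--         clean = word.strip(".,;:!?'\"")
--
--         # Check if this and next word(s) are single letters
--         if clean in abbreviation_set and len(clean) == 1 and clean.isalpha():
--             # Collect consecutive single letters
--             letters = [clean.upper()]
--             j = i + 1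
--
--             while j < len(words):
--                 next_clean = words[j].strip(".,;:!?'\"")
--                 if next_clean in abbreviation_set and len(next_clean) == 1 and next_clean.isalpha():
--                     letters.append(next_clean.upper())
--                     j += 1
--                 else:
--                     break
--
--             # Add dots: ["B", "R"] → "B. R."
--             # Note: Using dots like "B. R." as requested.
--             # If we want just uppercase "B R", we'd omit dots.
--             # But "B. R." is standard for initials.
--             result.extend([f"{letter}." for letter in letters])
--             i = j
--         else:
--             result.append(word)
--             i += 1
--
--     return result
-- ===== SOURCE B (Python) =====
-- def _normalize_single_letters(words: list, abbreviation_set: set) -> list: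
--     """Single flat pass with a buffer of pending initials (no index jumping)."""
--     def initial(word):
--         clean = word.strip(".,;:!?'\"")
--         if clean in abbreviation_set and len(clean) == 1 and clean.isalpha():
--             return clean.upper()
--         return None
--
--     result = []
--     buf = []
--     for word in words:
--         letter = initial(word)
--         if letter is None:
--             result.extend(f"{l}." for l in buf)
--             buf = []
--             result.append(word)
--         else:
--             buf.append(letter)
--     result.extend(f"{l}." for l in buf)
--     return result
-- ===== Notes on version B (the rewrite author's own statement) =====
-- stated objective: simpler
-- what changed: Replaces the index-jumping outer while with nested inner while by one flat pass over the words that keeps a buffer of pending matched initials and flushes it on each non-match and at the end.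
import Mathlib
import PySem

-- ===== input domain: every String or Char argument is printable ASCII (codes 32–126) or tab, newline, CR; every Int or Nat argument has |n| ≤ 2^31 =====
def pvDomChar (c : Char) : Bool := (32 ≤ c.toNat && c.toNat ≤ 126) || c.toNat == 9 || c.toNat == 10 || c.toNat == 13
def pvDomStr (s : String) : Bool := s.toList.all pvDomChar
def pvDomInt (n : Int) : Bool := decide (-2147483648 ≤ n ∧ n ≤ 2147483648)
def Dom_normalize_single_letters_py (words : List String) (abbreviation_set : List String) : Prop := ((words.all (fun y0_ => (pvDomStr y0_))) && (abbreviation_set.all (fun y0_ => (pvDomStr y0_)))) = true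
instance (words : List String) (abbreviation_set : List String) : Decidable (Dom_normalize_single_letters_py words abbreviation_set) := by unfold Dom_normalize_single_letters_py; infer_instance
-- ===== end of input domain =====

-- B replaces A's index-jumping outer/inner while loops by one flat pass with a buffer of
-- pending initials (objective: simpler; same asymptotic cost).

-- ===== PORT A =====
-- the inner `while j < len(words)` loop of A: collects consecutive matching initials,
-- returns (uppercased letters, remaining words)
def pvCollectA (abbreviation_set : List String) : List String → (List String × List String)
  | [] => ([], [])
  | w :: rest =>
    let next_clean := PySem.Str.stripChars w ".,;:!?'\""
    if abbreviation_set.contains next_clean && (PySem.Str.len next_clean == 1)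
        && PySem.Str.strIsalpha next_clean then
      ((pvCollectA abbreviation_set rest).1.cons (PySem.Str.upper next_clean),
       (pvCollectA abbreviation_set rest).2)
    else ([], w :: rest)

-- termination measure for the outer loop: the inner loop never grows the remainder
theorem pvCollectA_len (abbreviation_set : List String) (ws : List String) :
    (pvCollectA abbreviation_set ws).2.length ≤ ws.length := by
  induction ws with
  | nil => simp [pvCollectA]
  | cons w rest ih =>
    simp only [pvCollectA]
    split
    · exact Nat.le_succ_of_le ih
    · simp

-- the outer `while i < len(words)` loop of A
def pvGoA (abbreviation_set : List String) : List String → List String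
  | [] => []
  | w :: rest =>
    let clean := PySem.Str.stripChars w ".,;:!?'\""
    if abbreviation_set.contains clean && (PySem.Str.len clean == 1)
        && PySem.Str.strIsalpha clean then
      ((PySem.Str.upper clean :: (pvCollectA abbreviation_set rest).1).map (fun l => l ++ "."))
        ++ pvGoA abbreviation_set (pvCollectA abbreviation_set rest).2
    else
      w :: pvGoA abbreviation_set rest
termination_by ws => ws.length
decreasing_by
  · exact Nat.lt_succ_of_le (pvCollectA_len abbreviation_set rest)
  · simp

def normalize_single_letters_py (words : List String) (abbreviation_set : List String) : List String :=
  pvGoA abbreviation_set words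

-- ===== PORT B =====
-- helper `initial(word)`: the uppercased initial if the word is a matching single letter
def pvInitial (abbreviation_set : List String) (word : String) : Option String :=
  let clean := PySem.Str.stripChars word ".,;:!?'\""
  if abbreviation_set.contains clean && (PySem.Str.len clean == 1)
      && PySem.Str.strIsalpha clean then
    some (PySem.Str.upper clean)
  else none

-- `result.extend(f"{l}." for l in buf)`
def pvFlush (buf : List String) : List String := buf.map (fun l => l ++ ".")

-- one step of the flat `for word in words` loop over state (result, buf)
def pvStepB (abbreviation_set : List String) (st : List String × List String) (word : String) :
    List String × List String :=
  match pvInitial abbreviation_set word with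
  | none => (st.1 ++ pvFlush st.2 ++ [word], [])
  | some letter => (st.1, st.2 ++ [letter])

def normalize_single_letters_py_alt (words : List String) (abbreviation_set : List String) : List String :=
  let st := words.foldl (pvStepB abbreviation_set) ([], [])
  st.1 ++ pvFlush st.2

-- ===== PRECONDITION & SPEC =====
def Spec_normalize_single_letters_py (words : List String) (abbreviation_set : List String) (out : List String) : Prop := out = normalize_single_letters_py_alt words abbreviation_set
instance (words : List String) (abbreviation_set : List String) (out : List String) : Decidable (Spec_normalize_single_letters_py words abbreviation_set out) := by unfold Spec_normalize_single_letters_py; infer_instance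

-- ===== CLAIM (what is proved, stated in full; the proofs are below) =====
def Claim_equal_normalize_single_letters_py : Prop := ∀ (words : List String) (abbreviation_set : List String), Dom_normalize_single_letters_py words abbreviation_set → Spec_normalize_single_letters_py words abbreviation_set (normalize_single_letters_py words abbreviation_set)

-- ===== LEMMAS AND PROOFS =====

-- A's outer loop on a run of initials: flush the collected run, continue on the remainder
theorem pvGoA_collect (abbreviation_set : List String) (ws : List String) :
    pvGoA abbreviation_set ws =
      pvFlush (pvCollectA abbreviation_set ws).1
        ++ pvGoA abbreviation_set (pvCollectA abbreviation_set ws).2 := by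
  induction ws with
  | nil => simp [pvCollectA, pvGoA, pvFlush]
  | cons w rest ih =>
    by_cases hc : (abbreviation_set.contains (PySem.Str.stripChars w ".,;:!?'\"")
        && (PySem.Str.len (PySem.Str.stripChars w ".,;:!?'\"") == 1)
        && PySem.Str.strIsalpha (PySem.Str.stripChars w ".,;:!?'\""))
    · simp only [pvGoA, pvCollectA]
      rw [if_pos hc, if_pos hc]
      simp [pvFlush]
    · have hcoll : pvCollectA abbreviation_set (w :: rest) = ([], w :: rest) := by
        simp only [pvCollectA]; rw [if_neg hc]
      rw [hcoll]
      simp [pvFlush]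

-- the flat loop with any pending state computes res ++ flush buf ++ A's answer
theorem pvFoldB_eq (abbreviation_set : List String) (ws : List String) :
    ∀ (res buf : List String),
      (ws.foldl (pvStepB abbreviation_set) (res, buf)).1
        ++ pvFlush (ws.foldl (pvStepB abbreviation_set) (res, buf)).2
      = res ++ pvFlush buf ++ pvGoA abbreviation_set ws := by
  induction ws with
  | nil => intro res buf; simp [pvGoA]
  | cons w rest ih =>
    intro res buf
    simp only [List.foldl_cons, pvStepB]
    by_cases hc : (abbreviation_set.contains (PySem.Str.stripChars w ".,;:!?'\"")
        && (PySem.Str.len (PySem.Str.stripChars w ".,;:!?'\"") == 1)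
        && PySem.Str.strIsalpha (PySem.Str.stripChars w ".,;:!?'\""))
    · have hinit : pvInitial abbreviation_set w
          = some (PySem.Str.upper (PySem.Str.stripChars w ".,;:!?'\"")) := by
        simp only [pvInitial]; rw [if_pos hc]
      rw [hinit]
      simp only [ih]
      conv_rhs => rw [pvGoA]
      rw [if_pos hc, pvGoA_collect abbreviation_set rest]
      simp [pvFlush]
    · have hinit : pvInitial abbreviation_set w = none := by
        simp only [pvInitial]; rw [if_neg hc]
      rw [hinit]
      simp only [ih]
      conv_rhs => rw [pvGoA]
      rw [if_neg hc]
      simp [pvFlush]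

-- ===== VERDICT (by name: the statement is the Claim_ definition above) =====
theorem normalize_single_letters_py_spec : Claim_equal_normalize_single_letters_py := by
  intro words abbreviation_set _
  unfold Spec_normalize_single_letters_py normalize_single_letters_py normalize_single_letters_py_alt
  have h := pvFoldB_eq abbreviation_set words [] []
  simp only [pvFlush, List.map_nil, List.nil_append, List.append_nil] at h
  exact h.symm
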